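-- pv_equiv track=rewrite | github.com/sundanian1991/openmino | scripts/extract-learning-records-v2.py | cluster_and_deduplicate
-- ===== SOURCE A (Python) =====
-- from collections import defaultdict, Counter
-- from typing import List, Dict, Set, Tuple
--
-- def cluster_and_deduplicate(records: List[Dict]) -> List[Dict]:
--     """聚类相似记录并去重"""
--     # 按日期分组
--     by_date = defaultdict(list)
--     for record in records:
--         by_date[record['date']].append(record)
--
--     # 在同一天内，查找相似记录（摘要相似度 > 80%）
--     unique_records = []
--     seen_signatures = set()
--
--     for date, day_records in by_date.items():
--         for i, record in enumerate(day_records):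
--             # 生成签名（前50字符 + 类型）
--             signature = (record['summary'][:50], record['type'])
--
--             if signature in seen_signatures:
--                 continue
--
--             seen_signatures.add(signature)
--             unique_records.append(record)
--
--     return unique_records
-- ===== SOURCE B (Python) =====
-- def cluster_and_deduplicate(records):
--     """聚类相似记录并去重 — peel one date-group at a time (no bucket dict)."""
--     unique_records = []
--     seen_signatures = set()
--     rest = records
--     while rest:
--         d = rest[0]['date']
--         for r in rest:
--             if r['date'] == d:
--                 sig = (r['summary'][:50], r['type'])
--                 if sig not in seen_signatures:
--                     seen_signatures.add(sig)
--                     unique_records.append(r)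
--         rest = [r for r in rest if r['date'] != d]
--     return unique_records
-- ===== Notes on version B (the rewrite author's own statement) =====
-- stated objective: alternative
-- what changed: A builds a defaultdict of per-date buckets and then flattens them through the dedup loop; B never builds buckets: it repeatedly peels off the head record's whole date-group from the remaining list (process the group, then drop it via a filter) until the list is empty, threading the same seen-signature set.
import Mathlib
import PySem

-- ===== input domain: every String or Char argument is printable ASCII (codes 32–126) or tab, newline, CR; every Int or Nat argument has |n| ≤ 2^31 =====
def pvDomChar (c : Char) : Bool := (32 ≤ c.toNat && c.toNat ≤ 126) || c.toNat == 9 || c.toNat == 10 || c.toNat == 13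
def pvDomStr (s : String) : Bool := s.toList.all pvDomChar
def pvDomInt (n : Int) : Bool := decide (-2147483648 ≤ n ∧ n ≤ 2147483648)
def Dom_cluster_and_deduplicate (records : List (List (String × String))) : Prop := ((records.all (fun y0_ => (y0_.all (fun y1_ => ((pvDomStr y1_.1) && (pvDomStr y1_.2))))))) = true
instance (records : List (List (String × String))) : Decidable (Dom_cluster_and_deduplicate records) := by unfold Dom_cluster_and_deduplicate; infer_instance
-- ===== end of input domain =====

-- B replaces A's bucket-dict-then-flatten grouping by a peel-one-date-group-at-a-time loop
-- (process the head record's whole date-group, drop it by filtering, repeat): alternative, not faster.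


-- ===== PORT A =====
-- r[k] on the dict r (first match in the association list); the "" default is unreachable
-- under Pre_, which excludes the inputs where Python raises KeyError.
def pvFetch (r : List (String × String)) (k : String) : String :=
  ((r.find? (fun p => p.1 == k)).map (·.2)).getD ""

def cluster_and_deduplicate (records : List (List (String × String))) : List (List (String × String)) :=
  -- by_date = defaultdict(list); for record in records: by_date[record['date']].append(record)
  let by_date : PySem.Dict String (List (List (String × String))) :=
    records.foldl (fun d record => d.modify (pvFetch record "date") [] (fun b => b ++ [record])) PySem.Dict.empty
  -- for date, day_records in by_date.items(): for i, record in enumerate(day_records): …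
  let fin :=
    by_date.items.foldl (fun st p =>
      (PySem.List.enumerate p.2).foldl (fun st ir =>
        let record := ir.2
        let signature := (PySem.Str.slice (pvFetch record "summary") none (some 50), pvFetch record "type")
        if st.1.contains signature then st
        else (st.1.add signature, st.2 ++ [record])) st)
      ((PySem.Set.empty : PySem.Set (String × String)), ([] : List (List (String × String))))
  fin.2

-- ===== PORT B =====
-- the while loop of Source B: peel off the head record's date-group, then recurse on the rest
def pvPeel (rest : List (List (String × String)))
    (st : PySem.Set (String × String) × List (List (String × String))) :
    PySem.Set (String × String) × List (List (String × String)) :=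
  match rest with
  | [] => st
  | r0 :: t =>
    let d := pvFetch r0 "date"
    let st' := (r0 :: t).foldl (fun st r =>
        if pvFetch r "date" == d then
          let sig := (PySem.Str.slice (pvFetch r "summary") none (some 50), pvFetch r "type")
          if st.1.contains sig then st else (st.1.add sig, st.2 ++ [r])
        else st) st
    pvPeel ((r0 :: t).filter (fun r => !(pvFetch r "date" == d))) st'
  termination_by rest.length
  decreasing_by
    have := List.length_filter_le (fun r => !(pvFetch r "date" == pvFetch r0 "date")) t
    simp
    omega

def cluster_and_deduplicate_alt (records : List (List (String × String))) : List (List (String × String)) :=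
  (pvPeel records ((PySem.Set.empty : PySem.Set (String × String)), [])).2

-- ===== PRECONDITION & SPEC =====
-- Pre_ excludes exactly the records missing one of the keys 'date'/'summary'/'type', on which Python A raises KeyError.
def Pre_cluster_and_deduplicate (records : List (List (String × String))) : Prop :=
  (records.all (fun r =>
    (r.find? (fun p => p.1 == "date")).isSome &&
    (r.find? (fun p => p.1 == "summary")).isSome &&
    (r.find? (fun p => p.1 == "type")).isSome)) = true
instance (records : List (List (String × String))) : Decidable (Pre_cluster_and_deduplicate records) := by
  unfold Pre_cluster_and_deduplicate; infer_instance

def pvWitness_cluster_and_deduplicate : (List (List (String × String))) :=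
  [[("date", "2024-01-01"), ("summary", "abc"), ("type", "t")],
   [("date", "2024-01-02"), ("summary", "abc"), ("type", "t")]]

def Spec_cluster_and_deduplicate (records : List (List (String × String))) (out : List (List (String × String))) : Prop := out = cluster_and_deduplicate_alt records
instance (records : List (List (String × String))) (out : List (List (String × String))) : Decidable (Spec_cluster_and_deduplicate records out) := by unfold Spec_cluster_and_deduplicate; infer_instance

-- ===== CLAIM (what is proved, stated in full; the proofs are below) =====
def Claim_equal_cluster_and_deduplicate : Prop := ∀ (records : List (List (String × String))), Dom_cluster_and_deduplicate records → Pre_cluster_and_deduplicate records → Spec_cluster_and_deduplicate records (cluster_and_deduplicate records)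

-- ===== LEMMAS AND PROOFS =====

-- the shared deduplication step (A's loop body and B's guarded branch are both definitionally this)
def pvStep (st : PySem.Set (String × String) × List (List (String × String)))
    (r : List (String × String)) : PySem.Set (String × String) × List (List (String × String)) :=
  let sig := (PySem.Str.slice (pvFetch r "summary") none (some 50), pvFetch r "type")
  if st.1.contains sig then st else (st.1.add sig, st.2 ++ [r])

-- folding over enumerate while ignoring the index is folding over the list
theorem foldl_enumerate {α β : Type} (l : List α) (f : β → α → β) :
    ∀ (k : Int) (init : β),
      (PySem.List.enumerate l k).foldl (fun st ir => f st ir.2) init = l.foldl f init := by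
  induction l with
  | nil => intro k init; rfl
  | cons x t ih => intro k init; simpa [PySem.List.enumerate] using ih (k + 1) (f init x)

-- Set.add keeps an acc untouched on elements it already contains
theorem foldl_add_of_mem {α : Type} [BEq α] [LawfulBEq α] (d : α) :
    ∀ (xs : List α) (s : PySem.Set α), d ∈ s →
      xs.foldl PySem.Set.add s = (xs.filter (fun x => !(x == d))).foldl PySem.Set.add s := by
  intro xs
  induction xs with
  | nil => intro s _; rfl
  | cons x t ih =>
    intro s hd
    by_cases hx : x = d
    · subst hx
      have h1 : PySem.Set.contains s x = true := by simp [PySem.Set.contains, hd]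
      simp only [List.foldl_cons, List.filter_cons, beq_self_eq_true, Bool.not_true,
        PySem.Set.add, h1, if_true]
      exact ih s hd
    · have hxd : (x == d) = false := by simpa using hx
      simp only [List.filter_cons, hxd, Bool.not_false, List.foldl_cons]
      refine ih (PySem.Set.add s x) ?_
      simp only [PySem.Set.add]
      split <;> simp [hd]

theorem foldl_add_cons {α : Type} [BEq α] [LawfulBEq α] (d : α) :
    ∀ (xs : List α) (s : List α), (∀ x ∈ xs, (x == d) = false) →
      xs.foldl PySem.Set.add (d :: s) = d :: xs.foldl PySem.Set.add s := by
  intro xs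
  induction xs with
  | nil => intro s _; rfl
  | cons x t ih =>
    intro s h
    have hne : x ≠ d := by simpa using h x (by simp)
    have htail : ∀ y ∈ t, (y == d) = false := fun y hy => h y (by simp [hy])
    by_cases hm : x ∈ s
    · have h1 : PySem.Set.contains (d :: s) x = true := by simp [PySem.Set.contains, hm]
      have h2 : PySem.Set.contains s x = true := by simp [PySem.Set.contains, hm]
      simp only [List.foldl_cons, PySem.Set.add, h1, h2, if_true]
      exact ih s htail
    · have h1 : PySem.Set.contains (d :: s) x = false := by
        simp [PySem.Set.contains, hm, hne]
      have h2 : PySem.Set.contains s x = false := by simp [PySem.Set.contains, hm]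
      simp only [List.foldl_cons, PySem.Set.add, h1, h2, Bool.false_eq_true, if_false,
        List.cons_append]
      exact ih (s ++ [x]) htail

-- dedup peels its head: dedup (d :: xs) = d :: dedup (xs with d removed)
theorem dedup_cons {α : Type} [BEq α] [LawfulBEq α] (d : α) (xs : List α) :
    PySem.List.dedup (d :: xs) = d :: PySem.List.dedup (xs.filter (fun x => !(x == d))) := by
  show (d :: xs).foldl PySem.Set.add PySem.Set.empty = _
  have h1 : (d :: xs).foldl PySem.Set.add PySem.Set.empty = xs.foldl PySem.Set.add [d] := by
    simp [PySem.Set.add, PySem.Set.empty]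
  rw [h1, foldl_add_of_mem d xs [d] (by simp)]
  exact foldl_add_cons d (xs.filter (fun x => !(x == d))) []
    (fun x hx => by simpa using List.of_mem_filter hx)

theorem peel_eq (n : Nat) : ∀ (recs : List (List (String × String))), recs.length ≤ n →
    ∀ st, pvPeel recs st =
      (PySem.List.dedup (recs.map (fun r => pvFetch r "date"))).foldl
        (fun st c => (recs.filter (fun r => pvFetch r "date" == c)).foldl pvStep st) st := by
  induction n with
  | zero =>
    intro recs h st
    have : recs = [] := List.eq_nil_of_length_eq_zero (Nat.le_zero.mp h)
    subst this
    rw [pvPeel]; simp [PySem.List.dedup, PySem.Set.ofList]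
  | succ n ih =>
    intro recs h st
    match recs with
    | [] => rw [pvPeel]; simp [PySem.List.dedup, PySem.Set.ofList]
    | r0 :: t =>
      set d := pvFetch r0 "date" with hd
      set recs' := (r0 :: t).filter (fun r => !(pvFetch r "date" == d)) with hrecs'
      have hfc : recs' = t.filter (fun r => !(pvFetch r "date" == d)) := by
        simp [hrecs', hd]
      have hlen : recs'.length ≤ n := by
        have h1 := List.length_filter_le (fun r => !(pvFetch r "date" == d)) t
        have h2 : t.length ≤ n := by simpa using h
        rw [hfc]; omega
      have hst' : ((r0 :: t).foldl (fun st r =>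
          if pvFetch r "date" == d then
            let sig := (PySem.Str.slice (pvFetch r "summary") none (some 50), pvFetch r "type")
            if st.1.contains sig then st else (st.1.add sig, st.2 ++ [r])
          else st) st) =
          ((r0 :: t).filter (fun r => pvFetch r "date" == d)).foldl pvStep st := by
        exact PySem.List.foldl_if_eq_foldl_filter (fun r => pvFetch r "date" == d) pvStep (r0 :: t) st
      have hmapfil : (t.map (fun r => pvFetch r "date")).filter (fun x => !(x == d)) =
          recs'.map (fun r => pvFetch r "date") := by
        rw [hfc, List.filter_map]; rfl
      have hdedup : PySem.List.dedup ((r0 :: t).map (fun r => pvFetch r "date")) =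
          d :: PySem.List.dedup (recs'.map (fun r => pvFetch r "date")) := by
        rw [List.map_cons, dedup_cons, hmapfil]
      calc pvPeel (r0 :: t) st
          = pvPeel recs' (((r0 :: t).filter (fun r => pvFetch r "date" == d)).foldl pvStep st) := by
            rw [pvPeel, hst']
        _ = (PySem.List.dedup (recs'.map (fun r => pvFetch r "date"))).foldl
              (fun st c => (recs'.filter (fun r => pvFetch r "date" == c)).foldl pvStep st)
              (((r0 :: t).filter (fun r => pvFetch r "date" == d)).foldl pvStep st) := ih recs' hlen _
        _ = (PySem.List.dedup ((r0 :: t).map (fun r => pvFetch r "date"))).foldl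
              (fun st c => ((r0 :: t).filter (fun r => pvFetch r "date" == c)).foldl pvStep st) st := by
            rw [hdedup, List.foldl_cons]
            refine (PySem.List.foldl_congr_mem _ _ _ _ ?_).symm
            intro acc c hc
            have hcmem : c ∈ recs'.map (fun r => pvFetch r "date") := by
              exact (PySem.Set.mem_ofList _ _).mp hc
            have hcd : (c == d) = false := by
              rw [← hmapfil] at hcmem
              simpa using (List.of_mem_filter hcmem)
            have hfil : (r0 :: t).filter (fun r => pvFetch r "date" == c) =
                recs'.filter (fun r => pvFetch r "date" == c) := by
              rw [hrecs', List.filter_filter]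
              refine List.filter_congr ?_
              intro r _
              by_cases hr : pvFetch r "date" == c
              · have : pvFetch r "date" = c := by simpa using hr
                simp [this, hcd]
              · simp [Bool.eq_false_iff.mpr hr]
            rw [hfil]

theorem cluster_eq (records : List (List (String × String))) :
    cluster_and_deduplicate records = cluster_and_deduplicate_alt records := by
  -- rewrite A's bucket-building fold as a fold over (key, record) pairs
  have hmap :
      records.foldl (fun d record => d.modify (pvFetch record "date") [] (fun b => b ++ [record]))
          (PySem.Dict.empty : PySem.Dict String (List (List (String × String)))) =
        (records.map (fun r => (pvFetch r "date", r))).foldl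
          (fun d p => d.modify p.1 [] (fun b => b ++ [p.2])) PySem.Dict.empty := by
    rw [List.foldl_map]
  have hkeys :
      (records.foldl (fun d record => d.modify (pvFetch record "date") [] (fun b => b ++ [record]))
          (PySem.Dict.empty : PySem.Dict String (List (List (String × String))))).keys =
        PySem.List.dedup (records.map (fun r => pvFetch r "date")) := by
    simpa using PySem.Dict.keys_foldl_modify_key records (fun r => pvFetch r "date") []
      (fun _ r => (fun b => b ++ [r])) PySem.Dict.empty
  have hnodup :
      (records.foldl (fun d record => d.modify (pvFetch record "date") [] (fun b => b ++ [record]))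
          (PySem.Dict.empty : PySem.Dict String (List (List (String × String))))).keys.Nodup := by
    exact PySem.Dict.nodup_keys_foldl_modify_key records (fun r => pvFetch r "date") []
      (fun _ r => (fun b => b ++ [r])) PySem.Dict.empty (by simp [PySem.Dict.empty, PySem.Dict.keys])
  have hbucket : ∀ c,
      (records.foldl (fun d record => d.modify (pvFetch record "date") [] (fun b => b ++ [record]))
          (PySem.Dict.empty : PySem.Dict String (List (List (String × String))))).getD c [] =
        records.filter (fun r => pvFetch r "date" == c) := by
    intro c
    rw [hmap, PySem.Dict.getD_foldl_modify_append]
    simp [List.filter_map, Function.comp_def, List.map_map]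
  have hitems :
      (records.foldl (fun d record => d.modify (pvFetch record "date") [] (fun b => b ++ [record]))
          (PySem.Dict.empty : PySem.Dict String (List (List (String × String))))).items =
        (PySem.List.dedup (records.map (fun r => pvFetch r "date"))).map
          (fun c => (c, records.filter (fun r => pvFetch r "date" == c))) := by
    rw [PySem.Dict.items_eq_map_keys _ hnodup [], hkeys]
    exact List.map_congr_left (fun c _ => by rw [hbucket c])
  show (((records.foldl (fun d record => d.modify (pvFetch record "date") [] (fun b => b ++ [record]))
          (PySem.Dict.empty : PySem.Dict String (List (List (String × String))))).items).foldl
        (fun st p => (PySem.List.enumerate p.2).foldl (fun st ir => pvStep st ir.2) st)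
        ((PySem.Set.empty : PySem.Set (String × String)), ([] : List (List (String × String))))).2 =
      (pvPeel records ((PySem.Set.empty : PySem.Set (String × String)), [])).2
  rw [hitems, List.foldl_map,
    peel_eq records.length records (Nat.le_refl _)]
  congr 1
  exact PySem.List.foldl_congr_mem _ _ _ _ (fun acc c _ => foldl_enumerate _ _ _ _)

-- ===== VERDICT (by name: the statement is the Claim_ definition above) =====
theorem cluster_and_deduplicate_spec : Claim_equal_cluster_and_deduplicate := by
  intro records _ _
  exact cluster_eq records
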